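-- pv_equiv track=rewrite | github.com/LazarManic/GI-projekat | src/business_logic/util/longest_gap_util.py | get_jump_vector_right
-- ===== SOURCE A (Python) =====
-- def get_jump_vector_right(word:str):
--
--     sol = [1]*(len(word)+1)
--     char_dict = get_char_dict(word)
--     for arr in char_dict.values():
--         arr.append('#')
--
--     max_jump = 1
--     for i, c in reversed(list(enumerate(word))):
--
--         assert c in char_dict
--         if len(char_dict[c]):
--             next_i = char_dict[c].pop()
--             if next_i == '#':
--                 jump =  len(word) - i
--             else:
--                 jump = next_i - i
--
--         else:
--             jump = len(word) - i
--
--         if max_jump < jump: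
--             max_jump = jump
--
--         sol[i] = max_jump
--
--     return sol
--
-- def get_char_dict(word:str):
--     char_dict = {}
--     for i, c in enumerate(word):
--         if c in char_dict:
--             char_dict[c].append(i)
--         else:
--             char_dict[c] = [i]
--
--     return char_dict
-- ===== SOURCE B (Python) =====
-- def get_jump_vector_right(word: str):
--     n = len(word)
--     sol = [1] * (n + 1)
--     last_seen = {}
--     max_jump = 1
--     for i in range(n - 1, -1, -1):
--         c = word[i]
--         jump = last_seen[c] - i if c in last_seen else n - i
--         if jump > max_jump:
--             max_jump = jump
--         sol[i] = max_jump
--         last_seen[c] = i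
--     return sol
-- ===== Notes on version B (the rewrite author's own statement) =====
-- stated objective: simpler
-- what changed: B replaces A's two-pass scheme (precompute per-char ascending index lists, append a '#' sentinel, then pop from them while scanning right-to-left) by a single reverse scan keeping one dict last_seen: char -> nearest index to the right; no sentinel, no index lists.
import Mathlib
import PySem

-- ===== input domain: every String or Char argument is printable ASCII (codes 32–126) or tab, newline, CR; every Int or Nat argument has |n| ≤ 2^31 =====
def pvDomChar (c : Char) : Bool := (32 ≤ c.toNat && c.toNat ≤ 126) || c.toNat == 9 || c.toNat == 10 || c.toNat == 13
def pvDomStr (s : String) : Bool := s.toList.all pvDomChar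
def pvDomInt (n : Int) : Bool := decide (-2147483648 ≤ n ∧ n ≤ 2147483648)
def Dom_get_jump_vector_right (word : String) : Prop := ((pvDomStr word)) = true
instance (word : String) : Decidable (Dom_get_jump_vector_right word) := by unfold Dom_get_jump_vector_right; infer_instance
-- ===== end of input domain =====

-- B replaces A's two passes (per-char index lists + '#' sentinel, then popping) by one reverse
-- scan with a last_seen dict; same return value, simpler.

-- ===== PORT A =====
def get_char_dict (word : String) : PySem.Dict Char (List Int) :=
  (PySem.List.enumerate word.toList).foldl
    (fun d p =>
      if d.contains p.2 then d.modify p.2 [] (fun arr => arr ++ [p.1])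
      else d.insert p.2 [p.1])
    PySem.Dict.empty

-- body of A's reversed loop ('#' sentinel modelled as `none`, int entries as `some`)
def pvStepA (n : Int) (st : List Int × PySem.Dict Char (List (Option Int)) × Int)
    (p : Int × Char) : List Int × PySem.Dict Char (List (Option Int)) × Int :=
  let arr := st.2.1.getD p.2 []            -- char_dict[c]  (the assert always holds)
  if arr.length ≠ 0 then
    match PySem.List.pop? arr with         -- char_dict[c].pop()
    | some (next_i, rest) =>
      let jump : Int := match next_i with
        | none => n - p.1                  -- next_i == '#'
        | some v => v - p.1
      let mj := if st.2.2 < jump then jump else st.2.2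
      (PySem.List.pySetD st.1 p.1 mj, st.2.1.insert p.2 rest, mj)
    | none => st                           -- unreachable: arr ≠ []
  else
    let jump : Int := n - p.1
    let mj := if st.2.2 < jump then jump else st.2.2
    (PySem.List.pySetD st.1 p.1 mj, st.2.1, mj)

def get_jump_vector_right (word : String) : List Int :=
  -- sol = [1]*(len(word)+1); the dict mapping appends the '#' sentinel to every value
  (((PySem.List.enumerate word.toList).reverse).foldl
    (pvStepA (PySem.List.len word.toList))
    (PySem.List.pyRepeat [1] (PySem.List.len word.toList + 1),
     PySem.Dict.mk ((get_char_dict word).items.map (fun q => (q.1, q.2.map some ++ [none]))),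
     1)).1

-- ===== PORT B =====
-- body of B's reverse scan
def pvStepB (word : String) (n : Int) (st : List Int × PySem.Dict Char Int × Int)
    (i : Int) : List Int × PySem.Dict Char Int × Int :=
  let c := PySem.List.pyGetD word.toList i 'a'   -- word[i]; i always in range
  let jump : Int := match st.2.1.get? c with     -- last_seen[c] - i if c in last_seen else n - i
    | some v => v - i
    | none => n - i
  let mj := if st.2.2 < jump then jump else st.2.2
  (PySem.List.pySetD st.1 i mj, st.2.1.insert c i, mj)

def get_jump_vector_right_alt (word : String) : List Int :=
  ((PySem.List.pyRange (PySem.List.len word.toList - 1) (-1) (-1)).foldl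
    (pvStepB word (PySem.List.len word.toList))
    (PySem.List.pyRepeat [1] (PySem.List.len word.toList + 1), PySem.Dict.empty, 1)).1

-- ===== PRECONDITION & SPEC =====
def Spec_get_jump_vector_right (word : String) (out : List Int) : Prop := out = get_jump_vector_right_alt word
instance (word : String) (out : List Int) : Decidable (Spec_get_jump_vector_right word out) := by unfold Spec_get_jump_vector_right; infer_instance

-- ===== CLAIM (what is proved, stated in full; the proofs are below) =====
def Claim_equal_get_jump_vector_right : Prop := ∀ (word : String), Dom_get_jump_vector_right word → Spec_get_jump_vector_right word (get_jump_vector_right word)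

-- ===== LEMMAS AND PROOFS =====

-- indices j < k with word[j] = c, ascending (the list A's char_dict holds, truncated at k)
def pvIdx (w : List Char) (c : Char) (k : Nat) : List Int :=
  (PySem.List.pyRange 0 (k : Int)).filter (fun j => PySem.List.pyGetD w j 'a' == c)

-- the tail of A's list for c: the sentinel if c is unseen so far, else the last-seen index
def pvTail (w : List Char) (ls : PySem.Dict Char Int) (c : Char) : List (Option Int) :=
  match ls.get? c with
  | some v => [some v]
  | none => if c ∈ w then [none] else []

lemma charDict_getD (l : List (Int × Char)) (d : PySem.Dict Char (List Int)) (c : Char) :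
    (l.foldl (fun d p => if d.contains p.2 then d.modify p.2 [] (fun arr => arr ++ [p.1])
        else d.insert p.2 [p.1]) d).getD c []
      = d.getD c [] ++ (l.filter (fun p => p.2 == c)).map (·.1) := by
  induction l generalizing d with
  | nil => simp
  | cons p t ih =>
    simp only [List.foldl_cons, ih, List.filter_cons]
    by_cases hcon : d.contains p.2
    · simp only [hcon, if_true]
      by_cases hc : p.2 = c
      · subst hc
        simp [PySem.Dict.getD_modify]
      · simp [PySem.Dict.getD_modify, Ne.symm hc, hc]
    · simp only [hcon, if_false, Bool.false_eq_true]
      by_cases hc : p.2 = c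
      · subst hc
        simp [PySem.Dict.getD_of_not_contains d ([] : List Int) (by simpa using hcon)]
      · simp [PySem.Dict.getD_insert, Ne.symm hc, hc]

lemma charDict_contains (l : List (Int × Char)) (d : PySem.Dict Char (List Int)) (c : Char) :
    (l.foldl (fun d p => if d.contains p.2 then d.modify p.2 [] (fun arr => arr ++ [p.1])
        else d.insert p.2 [p.1]) d).contains c
      = (d.contains c || l.any (fun p => p.2 == c)) := by
  induction l generalizing d with
  | nil => simp
  | cons p t ih =>
    simp only [List.foldl_cons, ih, List.any_cons]
    by_cases hcon : d.contains p.2 <;>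
      simp [hcon, PySem.Dict.contains_modify, PySem.Dict.contains_insert, BEq.comm,
        Bool.or_left_comm, Bool.or_assoc]

lemma get?_mapValues (items : List (Char × List Int)) (c : Char) :
    (PySem.Dict.mk (items.map (fun q => (q.1, q.2.map some ++ [none])))).get? c
      = ((PySem.Dict.mk items).get? c).map (fun arr => arr.map some ++ [none]) := by
  induction items with
  | nil => simp [PySem.Dict.get?]
  | cons q t ih =>
    obtain ⟨k, v⟩ := q
    simp only [List.map_cons, PySem.Dict.get?_mk_cons]
    by_cases h : k = c <;> simp [h, ih]

-- the single induction that runs both loops in lockstep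
lemma lockstep (word : String) :
    ∀ (k : Nat), k ≤ word.toList.length →
    ∀ (sol : List Int) (m : Int) (cdA : PySem.Dict Char (List (Option Int)))
      (ls : PySem.Dict Char Int),
    (∀ c, cdA.getD c [] = (pvIdx word.toList c k).map some ++ pvTail word.toList ls c) →
    (((PySem.List.pyRange 0 (k : Int)).reverse.map
        (fun j => (j, PySem.List.pyGetD word.toList j 'a'))).foldl
        (pvStepA (word.toList.length : Int)) (sol, cdA, m)).1
      = ((PySem.List.pyRange 0 (k : Int)).reverse.foldl
        (pvStepB word (word.toList.length : Int)) (sol, ls, m)).1 := by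
  intro k
  induction k with
  | zero => intro _ sol m cdA ls _; simp [PySem.List.pyRange_one_eq_nil]
  | succ k ih =>
    intro hk sol m cdA ls hinv
    have hk' : k < word.toList.length := by omega
    have hrange : PySem.List.pyRange 0 ((k + 1 : Nat) : Int)
        = PySem.List.pyRange 0 (k : Int) ++ [(k : Int)] := by
      push_cast
      exact PySem.List.pyRange_one_succ_right (by positivity)
    set w := word.toList with hw
    set c : Char := PySem.List.pyGetD w (k : Int) 'a' with hc
    have hcw : w.getD k 'a' = c := by rw [hc, PySem.List.pyGetD_natCast]
    have hmem : c ∈ w := by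
      rw [← hcw, List.getD_eq_getElem _ _ hk']
      exact List.getElem_mem hk'
    -- the A-side list for c splits as prefix ++ [some k] ++ [tail element]
    have hidx : pvIdx w c (k + 1) = pvIdx w c k ++ [(k : Int)] := by
      rw [pvIdx, hrange, List.filter_append]
      simp [pvIdx, hc]
    have hpop : ∀ (x : Option Int),
        PySem.List.pop? (List.map some (pvIdx w c k) ++ [some (k : Int), x])
          = some (x, List.map some (pvIdx w c k) ++ [some (k : Int)]) := fun x => by
      simpa using PySem.List.pop?_last (List.map some (pvIdx w c k) ++ [some (k : Int)]) x
    have hinv' : ∀ c', (cdA.insert c (List.map some (pvIdx w c k) ++ [some (k : Int)])).getD c' []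
        = List.map some (pvIdx w c' k) ++ pvTail w (ls.insert c (k : Int)) c' := by
      intro c'
      by_cases hcc : c' = c
      · subst hcc
        rw [PySem.Dict.getD_insert, pvTail, PySem.Dict.get?_insert]
        simp
      · rw [PySem.Dict.getD_insert, if_neg hcc, hinv c', pvTail, pvTail,
          PySem.Dict.get?_insert, if_neg hcc]
        have hne : (PySem.List.pyGetD w (k : Int) 'a' == c') = false := by
          rw [← hc]
          exact beq_eq_false_iff_ne.mpr (fun h => hcc h.symm)
        have : pvIdx w c' (k + 1) = pvIdx w c' k := by
          rw [pvIdx, hrange, List.filter_append, pvIdx]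
          simp only [List.filter_singleton, hne, cond_false, List.append_nil]
        rw [this]
    rw [hrange]
    simp only [List.reverse_append, List.reverse_singleton, List.singleton_append,
      List.map_cons, List.foldl_cons]
    cases hls : ls.get? c with
    | none =>
      have hx : pvTail w ls c = [none] := by rw [pvTail, hls]; simp [hmem]
      have harr : cdA.getD c []
          = (List.map some (pvIdx w c k) ++ [some (k : Int)]) ++ [none] := by
        rw [hinv c, hidx, hx]; simp
      have hsA : pvStepA (w.length : Int) (sol, cdA, m) ((k : Int), PySem.List.pyGetD w (k : Int) 'a')
          = (PySem.List.pySetD sol (k : Int)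
              (if m < (w.length : Int) - (k : Int) then (w.length : Int) - (k : Int) else m),
             cdA.insert c (List.map some (pvIdx w c k) ++ [some (k : Int)]),
             if m < (w.length : Int) - (k : Int) then (w.length : Int) - (k : Int) else m) := by
        simp [pvStepA, ← hc, harr, hpop none]
      have hsB : pvStepB word (w.length : Int) (sol, ls, m) (k : Int)
          = (PySem.List.pySetD sol (k : Int)
              (if m < (w.length : Int) - (k : Int) then (w.length : Int) - (k : Int) else m),
             ls.insert c (k : Int),
             if m < (w.length : Int) - (k : Int) then (w.length : Int) - (k : Int) else m) := by
        simp [pvStepB, ← hw, ← hc, hls]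
      rw [hsA, hsB]
      exact ih (by omega) _ _ _ _ hinv'
    | some v =>
      have hx : pvTail w ls c = [some v] := by rw [pvTail, hls]
      have harr : cdA.getD c []
          = (List.map some (pvIdx w c k) ++ [some (k : Int)]) ++ [some v] := by
        rw [hinv c, hidx, hx]; simp
      have hsA : pvStepA (w.length : Int) (sol, cdA, m) ((k : Int), PySem.List.pyGetD w (k : Int) 'a')
          = (PySem.List.pySetD sol (k : Int)
              (if m < v - (k : Int) then v - (k : Int) else m),
             cdA.insert c (List.map some (pvIdx w c k) ++ [some (k : Int)]),
             if m < v - (k : Int) then v - (k : Int) else m) := by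
        simp [pvStepA, ← hc, harr, hpop (some v)]
      have hsB : pvStepB word (w.length : Int) (sol, ls, m) (k : Int)
          = (PySem.List.pySetD sol (k : Int)
              (if m < v - (k : Int) then v - (k : Int) else m),
             ls.insert c (k : Int),
             if m < v - (k : Int) then v - (k : Int) else m) := by
        simp [pvStepB, ← hw, ← hc, hls]
      rw [hsA, hsB]
      exact ih (by omega) _ _ _ _ hinv'

-- the initial dict (index lists with the '#' sentinel appended) satisfies the invariant at n
lemma init_inv (word : String) (c : Char) :
    (PySem.Dict.mk ((get_char_dict word).items.map
        (fun q => (q.1, q.2.map some ++ [none])))).getD c ([] : List (Option Int))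
      = (pvIdx word.toList c word.toList.length).map some
        ++ pvTail word.toList PySem.Dict.empty c := by
  set w := word.toList with hw
  have hany : (w.any (fun a => a == c) = true) ↔ c ∈ w := by simp
  have hcontains : (get_char_dict word).contains c = w.any (fun a => a == c) := by
    rw [get_char_dict, charDict_contains]
    calc (PySem.Dict.empty.contains c || (PySem.List.enumerate w).any fun p => p.2 == c)
        = (PySem.List.enumerate w).any (fun p => p.2 == c) := by simp
      _ = ((PySem.List.enumerate w).map (·.2)).any (fun a => a == c) := by
          rw [List.any_map]; rfl
      _ = w.any (fun a => a == c) := by rw [PySem.List.map_snd_enumerate]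
  have hfull : (get_char_dict word).getD c []
      = ((PySem.List.enumerate w).filter (fun p => p.2 == c)).map (·.1) := by
    rw [get_char_dict, charDict_getD]; simp [hw]
  have hidxfull : ((PySem.List.enumerate w).filter (fun p => p.2 == c)).map (·.1)
      = pvIdx w c w.length := by
    rw [PySem.List.enumerate_eq_map_pyRange w 'a', List.filter_map, List.map_map, pvIdx]
    simp [Function.comp_def]
  rw [PySem.Dict.getD_eq_get?_getD, get?_mapValues, pvTail]
  by_cases hmem : c ∈ w
  · have hct : (get_char_dict word).contains c = true := by
      rw [hcontains]; exact hany.mpr hmem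
    cases hgc : (get_char_dict word).get? c with
    | none =>
      have := (PySem.Dict.get?_eq_none_iff_contains (get_char_dict word) c).mp hgc
      rw [this] at hct; cases hct
    | some arr =>
      have harr : arr = pvIdx w c w.length := by
        have hg := PySem.Dict.getD_eq_get?_getD (get_char_dict word) c ([] : List Int)
        rw [hgc] at hg
        simp only [Option.getD_some] at hg
        rw [← hg]
        exact hfull.trans hidxfull
      simp [harr, hmem]
  · have hct : (get_char_dict word).contains c = false := by
      rw [hcontains]
      exact Bool.eq_false_iff.mpr (fun h => hmem (hany.mp h))
    rw [(PySem.Dict.get?_eq_none_iff_contains (get_char_dict word) c).mpr hct]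
    have hnil : pvIdx w c w.length = [] := by
      rw [pvIdx, List.filter_eq_nil_iff]
      intro j hj
      have hjr := (PySem.List.mem_pyRange_one).mp hj
      obtain ⟨jn, rfl⟩ : ∃ jn : Nat, j = (jn : Int) := ⟨j.toNat, by omega⟩
      have hjn : jn < w.length := by omega
      rw [PySem.List.pyGetD_natCast, List.getD_eq_getElem _ _ hjn]
      simp only [beq_iff_eq]
      intro h
      exact hmem (h ▸ List.getElem_mem hjn)
    simp [hnil, hmem]

-- ===== VERDICT (by name: the statement is the Claim_ definition above) =====
theorem get_jump_vector_right_spec : Claim_equal_get_jump_vector_right := by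
  intro word _
  unfold Spec_get_jump_vector_right get_jump_vector_right get_jump_vector_right_alt
  have hlen : PySem.List.len word.toList = (word.toList.length : Int) := by
    simp [PySem.List.len_eq]
  rw [hlen]
  have hB : PySem.List.pyRange ((word.toList.length : Int) - 1) (-1) (-1)
      = (PySem.List.pyRange 0 (word.toList.length : Int)).reverse := by
    rw [PySem.List.pyRange_neg_one_eq_reverse]
    norm_num
  have hA : (PySem.List.enumerate word.toList).reverse
      = (PySem.List.pyRange 0 (word.toList.length : Int)).reverse.map
          (fun j => (j, PySem.List.pyGetD word.toList j 'a')) := by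
    rw [PySem.List.enumerate_eq_map_pyRange word.toList 'a', List.map_reverse]
    simp [PySem.List.len_eq]
  rw [hA, hB]
  exact lockstep word word.toList.length le_rfl _ _ _ _ (init_inv word)
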